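-- pv_equiv track=rewrite | github.com/soi-ha/CodingTest | week2/ba2447.py | write_star
-- ===== SOURCE A (Python) =====
-- def write_star(n):
--   li = [] # 별을 담을 리스트
--   for i in range(3*len(n)):
--     if i // len(n) == 1: #n이 3으로 나누어 떨어지지 않는다면, 가운데 공백 (n의 길이만큼)
--       li.append(n[i % len(n)] + ' ' * len(n) + n[i % len(n)])
--     else: #n이 3으로 나누어 떨어진다면, 공백없이 가득 채우기
--       li.append(n[i % len(n)] * 3)
--   return li
-- ===== SOURCE B (Python) =====
-- def write_star(n):
--   top = [c * 3 for c in n]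
--   mid = [c + ' ' * len(n) + c for c in n]
--   return top + mid + top
-- ===== Notes on version B (the rewrite author's own statement) =====
-- stated objective: simpler
-- what changed: Replaces the single branched loop over range(3*len(n)) with index arithmetic (i//len, i%len) by two direct comprehensions over the characters of n, reusing the top block for both outer thirds (top + mid + top).
import Mathlib
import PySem

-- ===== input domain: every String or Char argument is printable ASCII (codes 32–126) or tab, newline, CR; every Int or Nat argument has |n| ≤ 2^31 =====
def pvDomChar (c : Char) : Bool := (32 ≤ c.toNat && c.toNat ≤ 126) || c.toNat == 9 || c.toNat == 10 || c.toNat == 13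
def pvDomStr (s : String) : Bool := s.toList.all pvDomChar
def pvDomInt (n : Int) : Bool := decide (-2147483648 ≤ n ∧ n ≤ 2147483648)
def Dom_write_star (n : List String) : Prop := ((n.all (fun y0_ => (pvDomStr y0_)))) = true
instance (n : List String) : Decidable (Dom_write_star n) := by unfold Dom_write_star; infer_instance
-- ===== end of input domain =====

-- B replaces the branched index loop by two comprehensions over n, reused as top + mid + top (simpler).

-- ===== PORT A =====
-- s * k on strings, exact via PySem.List.pyRepeat on the character list
def pyStrMul (s : String) (k : Int) : String := String.ofList (PySem.List.pyRepeat s.toList k)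

def write_star (n : List String) : List String :=
  (PySem.List.pyRange 0 (3 * PySem.List.len n) 1).foldl
    (fun li i =>
      if PySem.Int.floordiv i (PySem.List.len n) = 1 then
        li ++ [PySem.List.pyGetD n (PySem.Int.mod i (PySem.List.len n)) "" ++
               pyStrMul " " (PySem.List.len n) ++
               PySem.List.pyGetD n (PySem.Int.mod i (PySem.List.len n)) ""]
      else
        li ++ [pyStrMul (PySem.List.pyGetD n (PySem.Int.mod i (PySem.List.len n)) "") 3]) []

-- ===== PORT B =====
def write_star_alt (n : List String) : List String :=
  let top := n.map (fun c => pyStrMul c 3)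
  let mid := n.map (fun c => c ++ pyStrMul " " (PySem.List.len n) ++ c)
  top ++ mid ++ top

-- ===== PRECONDITION & SPEC =====
def Spec_write_star (n : List String) (out : List String) : Prop := out = write_star_alt n
instance (n : List String) (out : List String) : Decidable (Spec_write_star n out) := by unfold Spec_write_star; infer_instance

-- ===== CLAIM (what is proved, stated in full; the proofs are below) =====
def Claim_equal_write_star : Prop := ∀ (n : List String), Dom_write_star n → Spec_write_star n (write_star n)

-- ===== LEMMAS AND PROOFS =====

-- a branched append loop is a map of the branched element function
theorem foldl_append_if_both {α β : Type} (p : α → Prop) [DecidablePred p] (f g : α → β)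
    (l : List α) (acc : List β) :
    l.foldl (fun acc i => if p i then acc ++ [f i] else acc ++ [g i]) acc
      = acc ++ l.map (fun i => if p i then f i else g i) := by
  induction l generalizing acc with
  | nil => simp
  | cons x t ih => simp only [List.foldl_cons, List.map_cons]; split_ifs <;>
      simp [ih]

-- mapping an indexed element function over range(len n) is a map over n
theorem map_range_getD {β : Type} (n : List String) (F : String → β) (d : String) :
    (List.range n.length).map (fun (j : Nat) => F (PySem.List.pyGetD n (j : Int) d))
      = n.map F := by
  apply List.ext_getElem
  · simp
  · intro i h1 h2
    simp only [List.getElem_map, List.getElem_range]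
    congr 1
    simp only [List.length_map, List.length_range] at h1
    simp [PySem.List.pyGetD, PySem.List.pyGet?_natCast, List.getElem?_eq_getElem h1]

-- a shifted integer range as a map over List.range
theorem map_pyRange_shift {β : Type} (F : Int → β) (a b : Int) (L : Nat)
    (hab : (b - a).toNat = L) :
    (PySem.List.pyRange a b 1).map F = (List.range L).map (fun (j : Nat) => F (a + j)) := by
  rw [PySem.List.pyRange_one, List.map_map, hab]
  rfl

-- ===== VERDICT (by name: the statement is the Claim_ definition above) =====
theorem write_star_spec : Claim_equal_write_star := by
  intro n _
  show write_star n = write_star_alt n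
  unfold write_star write_star_alt
  rw [foldl_append_if_both]
  set k : Int := PySem.List.len n with hk
  have hkL : k = (n.length : Int) := by simp [hk, PySem.List.len]
  have hk0 : 0 ≤ k := by omega
  have hsplit : PySem.List.pyRange 0 (3 * k) 1
      = (PySem.List.pyRange 0 k 1 ++ PySem.List.pyRange k (2 * k) 1)
        ++ PySem.List.pyRange (2 * k) (3 * k) 1 := by
    rw [PySem.List.pyRange_one_append 0 k (3 * k) hk0 (by omega),
        PySem.List.pyRange_one_append k (2 * k) (3 * k) (by omega) (by omega)]
    exact (List.append_assoc _ _ _).symm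
  rw [hsplit]
  simp only [List.map_append, List.nil_append]
  -- the element function of the loop
  set E : Int → String := fun i =>
    if PySem.Int.floordiv i k = 1 then
      PySem.List.pyGetD n (PySem.Int.mod i k) "" ++ pyStrMul " " k ++
        PySem.List.pyGetD n (PySem.Int.mod i k) ""
    else pyStrMul (PySem.List.pyGetD n (PySem.Int.mod i k) "") 3 with hE
  -- arithmetic facts inside each third
  have harith : ∀ (q : Int) (j : Nat), (j : Int) < k →
      PySem.Int.floordiv (q * k + j) k = q ∧ PySem.Int.mod (q * k + j) k = j := by
    intro q j hj
    have hkpos : 0 < k := by omega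
    constructor
    · rw [PySem.Int.floordiv_eq_iff_of_pos hkpos]
      constructor <;> nlinarith [Int.natCast_nonneg j]
    · rw [PySem.Int.mod_eq_emod_of_pos hkpos]
      have h1 : q * k + (j : Int) = (j : Int) + k * q := by ring
      rw [h1, Int.add_mul_emod_self_left]
      exact Int.emod_eq_of_lt (Int.natCast_nonneg j) hj
  have hsegmap : ∀ (q : Int), q ≠ 1 →
      (PySem.List.pyRange (q * k) ((q + 1) * k) 1).map E
        = n.map (fun c => pyStrMul c 3) := by
    intro q hq
    rw [map_pyRange_shift E (q * k) ((q + 1) * k) n.length (by rw [show ((q+1)*k - q*k) = k by ring]; omega)]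
    rw [← map_range_getD n (fun c => pyStrMul c 3) ""]
    apply List.map_congr_left
    intro j hj
    have hjlt : (j : Int) < k := by
      simp only [List.mem_range] at hj; omega
    obtain ⟨hfd, hmd⟩ := harith q j hjlt
    simp [hE, hfd, hmd, hq]
  have hmidmap :
      (PySem.List.pyRange (1 * k) ((1 + 1) * k) 1).map E
        = n.map (fun c => c ++ pyStrMul " " k ++ c) := by
    rw [map_pyRange_shift E (1 * k) ((1 + 1) * k) n.length (by rw [show ((1+1)*k - 1*k) = k by ring]; omega)]
    rw [← map_range_getD n (fun c => c ++ pyStrMul " " k ++ c) ""]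
    apply List.map_congr_left
    intro j hj
    have hjlt : (j : Int) < k := by
      simp only [List.mem_range] at hj; omega
    obtain ⟨hfd, hmd⟩ := harith 1 j hjlt
    rw [one_mul] at hfd hmd
    simp [hE, hfd, hmd]
  have e0 := hsegmap 0 (by norm_num)
  have e2 := hsegmap 2 (by norm_num)
  norm_num at e0 e2 hmidmap
  rw [e0, e2, hmidmap]
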